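-- pv_equiv track=rewrite | github.com/RobertoGuzmanJr/ProjectEuler | 1-10/Problem_4.py | Is3DigitDivisible
-- ===== SOURCE A (Python) =====
-- def Is3DigitDivisible (N):
--     if (N < 100 ** 2 | N > 999 ** 2):
--         return False
--     for i in range(100, 1000):
--         if N % i == 0:
--             M = (int)(N / i);
--             if M >= 100 and M <= 999:
--                 return True
-- ===== SOURCE B (Python) =====
-- def Is3DigitDivisible (N):
--     if (N < 100 ** 2 | N > 999 ** 2):
--         return False
--     for i in range(100, 1000):
--         for j in range(100, 1000):
--             if i * j == N:
--                 return True
-- ===== Notes on version B (the rewrite author's own statement) =====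
-- stated objective: alternative
-- what changed: Replaces the divisibility scan with cofactor reconstruction via float division by a direct nested brute-force search over the product space i*j, keeping the original guard line verbatim.
import Mathlib
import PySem

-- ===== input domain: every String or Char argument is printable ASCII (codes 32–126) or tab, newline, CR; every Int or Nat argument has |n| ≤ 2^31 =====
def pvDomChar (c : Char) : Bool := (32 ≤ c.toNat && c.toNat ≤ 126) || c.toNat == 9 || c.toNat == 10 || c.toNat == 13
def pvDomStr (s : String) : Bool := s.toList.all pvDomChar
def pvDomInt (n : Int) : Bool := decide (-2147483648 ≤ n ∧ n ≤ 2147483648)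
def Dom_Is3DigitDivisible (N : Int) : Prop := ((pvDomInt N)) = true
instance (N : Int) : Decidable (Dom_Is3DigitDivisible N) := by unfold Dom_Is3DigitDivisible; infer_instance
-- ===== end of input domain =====

-- B replaces A's divisibility scan + float-division cofactor with a direct nested
-- brute-force search of the 3-digit product space (alternative algorithm, same values,
-- including A's verbatim buggy `|` guard and the implicit None fall-through).

-- ===== PORT A =====
-- the for-loop: returns some true on the first i with N % i == 0 and 100 ≤ int(N/i) ≤ 999
-- `(int)(N / i)` is Python float division then truncation; on the admitted domain
-- (|N| ≤ 2^31 < 2^53) with N % i == 0 it is exactly truncated division, ported as Int.tdiv.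
def pvLoopA (N : Int) : List Int → Option Bool
  | [] => none
  | i :: rest =>
    if PySem.Int.mod N i = 0 then
      let M := Int.tdiv N i
      if M ≥ 100 ∧ M ≤ 999 then some true else pvLoopA N rest
    else pvLoopA N rest

def Is3DigitDivisible (N : Int) : Option Bool :=
  -- `N < 100 ** 2 | N > 999 ** 2` parses as the chained comparison
  -- (N < (100**2 | N)) and ((100**2 | N) > 999**2); `|` ported with PySem.Int.bor.
  if N < PySem.Int.bor (100 ^ 2) N ∧ PySem.Int.bor (100 ^ 2) N > 999 ^ 2 then
    some false
  else
    pvLoopA N (PySem.List.pyRange 100 1000 1)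

-- ===== PORT B =====
def pvInnerB (N i : Int) : List Int → Option Bool
  | [] => none
  | j :: rest => if i * j = N then some true else pvInnerB N i rest

def pvOuterB (N : Int) : List Int → Option Bool
  | [] => none
  | i :: rest =>
    match pvInnerB N i (PySem.List.pyRange 100 1000 1) with
    | some b => some b
    | none => pvOuterB N rest

def Is3DigitDivisible_alt (N : Int) : Option Bool :=
  if N < PySem.Int.bor (100 ^ 2) N ∧ PySem.Int.bor (100 ^ 2) N > 999 ^ 2 then
    some false
  else
    pvOuterB N (PySem.List.pyRange 100 1000 1)

-- ===== PRECONDITION & SPEC =====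
def Spec_Is3DigitDivisible (N : Int) (out : Option Bool) : Prop := out = Is3DigitDivisible_alt N
instance (N : Int) (out : Option Bool) : Decidable (Spec_Is3DigitDivisible N out) := by unfold Spec_Is3DigitDivisible; infer_instance

-- ===== CLAIM (what is proved, stated in full; the proofs are below) =====
def Claim_equal_Is3DigitDivisible : Prop := ∀ (N : Int), Dom_Is3DigitDivisible N → Spec_Is3DigitDivisible N (Is3DigitDivisible N)

-- ===== LEMMAS AND PROOFS =====

theorem pvLoopA_eq (N : Int) (l : List Int) :
    pvLoopA N l =
      if (∃ i ∈ l, PySem.Int.mod N i = 0 ∧ 100 ≤ Int.tdiv N i ∧ Int.tdiv N i ≤ 999)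
      then some true else none := by
  induction l with
  | nil => simp [pvLoopA]
  | cons i rest ih =>
    simp only [pvLoopA, ih, List.exists_mem_cons_iff]
    by_cases h1 : PySem.Int.mod N i = 0 <;>
      by_cases h2 : Int.tdiv N i ≥ 100 ∧ Int.tdiv N i ≤ 999 <;>
        simp [h1, h2]

theorem pvInnerB_eq (N i : Int) (l : List Int) :
    pvInnerB N i l = if (∃ j ∈ l, i * j = N) then some true else none := by
  induction l with
  | nil => simp [pvInnerB]
  | cons j rest ih =>
    simp only [pvInnerB, ih, List.exists_mem_cons_iff]
    by_cases h : i * j = N <;> simp [h]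

set_option maxRecDepth 8192 in
theorem pvOuterB_eq (N : Int) (l : List Int) :
    pvOuterB N l =
      if (∃ i ∈ l, ∃ j ∈ PySem.List.pyRange 100 1000 1, i * j = N)
      then some true else none := by
  induction l with
  | nil => simp [pvOuterB]
  | cons i rest ih =>
    simp only [pvOuterB, pvInnerB_eq, ih, List.exists_mem_cons_iff]
    by_cases h : ∃ j ∈ PySem.List.pyRange 100 1000 1, i * j = N
    · rw [if_pos h, if_pos (Or.inl h)]
    · rw [if_neg h]
      by_cases h2 : ∃ i ∈ rest, ∃ j ∈ PySem.List.pyRange 100 1000 1, i * j = N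
      · rw [if_pos h2, if_pos (Or.inr h2)]
      · rw [if_neg h2, if_neg (fun hc => hc.elim h h2)]

-- the pointwise equivalence of the two search conditions at a fixed 3-digit i
theorem pv_cond_iff (N i : Int) (hi : 100 ≤ i ∧ i < 1000) :
    (PySem.Int.mod N i = 0 ∧ 100 ≤ Int.tdiv N i ∧ Int.tdiv N i ≤ 999) ↔
      ∃ j, (100 ≤ j ∧ j < 1000) ∧ i * j = N := by
  have hipos : (0 : Int) < i := by omega
  constructor
  · rintro ⟨hmod, hlo, hhi⟩
    have hne : i ≠ 0 := by omega
    have hdvd : i ∣ N := (PySem.Int.mod_eq_zero_iff_dvd N i).mp hmod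
    obtain ⟨q, hq⟩ := hdvd
    have ht : Int.tdiv N i = q := by
      rw [hq]; exact Int.mul_tdiv_cancel_left q hne
    refine ⟨q, ⟨by omega, by omega⟩, ?_⟩
    omega
  · rintro ⟨j, ⟨hj1, hj2⟩, hij⟩
    have hmod : PySem.Int.mod N i = 0 :=
      (PySem.Int.mod_eq_zero_iff_dvd N i).mpr ⟨j, hij.symm⟩
    have ht : Int.tdiv N i = j := by
      rw [← hij]; exact Int.mul_tdiv_cancel_left j (by omega)
    exact ⟨hmod, by omega, by omega⟩

-- ===== VERDICT (by name: the statement is the Claim_ definition above) =====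
theorem Is3DigitDivisible_spec : Claim_equal_Is3DigitDivisible := by
  intro N _
  unfold Spec_Is3DigitDivisible Is3DigitDivisible Is3DigitDivisible_alt
  split_ifs with hg
  · rfl
  · simp only [pvLoopA_eq, pvOuterB_eq]
    congr 1
    simp only [eq_iff_iff]
    constructor
    · rintro ⟨i, hi, hc⟩
      have hi' := (PySem.List.mem_pyRange_one).mp hi
      obtain ⟨j, hj, hij⟩ := (pv_cond_iff N i hi').mp hc
      exact ⟨i, hi, j, (PySem.List.mem_pyRange_one).mpr hj, hij⟩
    · rintro ⟨i, hi, j, hj, hij⟩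
      have hi' := (PySem.List.mem_pyRange_one).mp hi
      have hj' := (PySem.List.mem_pyRange_one).mp hj
      exact ⟨i, hi, (pv_cond_iff N i hi').mpr ⟨j, hj', hij⟩⟩
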